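-- pv_equiv track=rewrite | github.com/wakamex/wezterm | generate-hotkeys.py | format_key
-- ===== SOURCE A (Python) =====
-- def format_key(mods_raw, key, platform="linux"):
--     parts = [m.replace("Modifiers::", "") for m in mods_raw.split("|")]
--     parts = [p for p in parts if p != "NONE"]
--
--     if platform != "mac" and "SUPER" in parts:
--         parts.remove("SUPER")
--         if "CTRL" not in parts:
--             parts.append("CTRL")
--         if "SHIFT" not in parts:
--             parts.append("SHIFT")
--
--     order = {"CTRL": 0, "SHIFT": 1, "ALT": 2, "SUPER": 3}
--     parts.sort(key=lambda x: order.get(x, 9))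
--
--     if platform == "mac":
--         mod_map = {"CTRL": "Ctrl", "SHIFT": "Shift", "ALT": "Opt", "SUPER": "Cmd"}
--     else:
--         mod_map = {"CTRL": "Ctrl", "SHIFT": "Shift", "ALT": "Alt"}
--
--     formatted = [mod_map.get(m, m) for m in parts]
--     if formatted:
--         return "+".join(formatted) + "+" + key
--     return key
-- ===== SOURCE B (Python) =====
-- def _mod_name(m, mac):
--     if m == "CTRL":
--         return "Ctrl"
--     if m == "SHIFT":
--         return "Shift"
--     if m == "ALT":
--         return "Opt" if mac else "Alt"
--     return "Cmd" if mac else "SUPER"  # m == "SUPER"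
--
--
-- def format_key(mods_raw, key, platform="linux"):
--     toks = []
--     for t in mods_raw.split("|"):
--         t = t.replace("Modifiers::", "")
--         if t != "NONE":
--             toks.append(t)
--
--     if platform != "mac" and "SUPER" in toks:
--         toks.remove("SUPER")
--         for extra in ("CTRL", "SHIFT"):
--             if extra not in toks:
--                 toks.append(extra)
--
--     mac = platform == "mac"
--     canon = ("CTRL", "SHIFT", "ALT", "SUPER")
--     out = [_mod_name(m, mac) for m in canon for t in toks if t == m]
--     out += [t for t in toks if t not in canon]
--     return "+".join(out + [key])
-- ===== Notes on version B (the rewrite author's own statement) =====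
-- stated objective: idiomatic
-- what changed: Replaces A's priority-dict stable sort plus get-with-default renaming by a single walk over the fixed canonical order [CTRL,SHIFT,ALT,SUPER] that collects matching tokens (then the unknown tokens in original order), and folds the empty/non-empty return into one join over out+[key].
import Mathlib
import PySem

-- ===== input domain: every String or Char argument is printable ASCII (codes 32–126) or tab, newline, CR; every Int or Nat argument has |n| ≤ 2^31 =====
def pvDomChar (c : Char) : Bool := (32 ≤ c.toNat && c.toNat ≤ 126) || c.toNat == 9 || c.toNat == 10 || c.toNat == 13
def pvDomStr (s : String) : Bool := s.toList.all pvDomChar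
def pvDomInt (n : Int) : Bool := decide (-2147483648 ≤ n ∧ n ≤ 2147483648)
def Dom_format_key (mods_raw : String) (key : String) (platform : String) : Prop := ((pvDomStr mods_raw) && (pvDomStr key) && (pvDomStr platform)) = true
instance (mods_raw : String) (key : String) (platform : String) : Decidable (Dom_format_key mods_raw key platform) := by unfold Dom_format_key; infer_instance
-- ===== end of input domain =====

-- B replaces A's priority-dict stable sort + get-with-default map by a single walk over the
-- fixed canonical order ["CTRL","SHIFT","ALT","SUPER"] followed by the unknown tokens in
-- original order, and folds the empty/non-empty return into one join (objective: idiomatic).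

-- ===== PORT A =====
def format_key (mods_raw : String) (key : String) (platform : String) : String :=
  -- parts = [m.replace("Modifiers::", "") for m in mods_raw.split("|")]   (sep "|" ≠ "", split? never none)
  let parts := ((PySem.Str.split? mods_raw "|").getD []).map
      (fun m => PySem.Str.replace m "Modifiers::" "")
  -- parts = [p for p in parts if p != "NONE"]
  let parts := parts.filter (fun p => p != "NONE")
  let parts :=
    if platform != "mac" && parts.contains "SUPER" then
      -- parts.remove("SUPER")   (guarded by membership, so remove? is never none)
      let parts := (PySem.List.remove? parts "SUPER").getD parts
      let parts := if parts.contains "CTRL" then parts else parts ++ ["CTRL"]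
      if parts.contains "SHIFT" then parts else parts ++ ["SHIFT"]
    else parts
  -- order = {...}; parts.sort(key=lambda x: order.get(x, 9))  (dict literal, distinct keys)
  let order : PySem.Dict String Int := ⟨[("CTRL", 0), ("SHIFT", 1), ("ALT", 2), ("SUPER", 3)]⟩
  let parts := PySem.List.sorted parts (fun x => order.getD x 9)
  let mod_map : PySem.Dict String String :=
    if platform == "mac" then ⟨[("CTRL", "Ctrl"), ("SHIFT", "Shift"), ("ALT", "Opt"), ("SUPER", "Cmd")]⟩
    else ⟨[("CTRL", "Ctrl"), ("SHIFT", "Shift"), ("ALT", "Alt")]⟩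
  let formatted := parts.map (fun m => mod_map.getD m m)
  if formatted != [] then PySem.Str.join "+" formatted ++ "+" ++ key else key

-- ===== PORT B =====
-- helper _mod_name of Source B
def pvModName (m : String) (mac : Bool) : String :=
  if m == "CTRL" then "Ctrl"
  else if m == "SHIFT" then "Shift"
  else if m == "ALT" then (if mac then "Opt" else "Alt")
  else (if mac then "Cmd" else "SUPER")  -- m == "SUPER"

def format_key_alt (mods_raw : String) (key : String) (platform : String) : String :=
  -- for t in mods_raw.split("|"): t = t.replace(...); if t != "NONE": toks.append(t)
  let toks := ((PySem.Str.split? mods_raw "|").getD []).foldl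
      (fun acc t =>
        if PySem.Str.replace t "Modifiers::" "" != "NONE" then
          acc ++ [PySem.Str.replace t "Modifiers::" ""] else acc) []
  let toks :=
    if platform != "mac" && toks.contains "SUPER" then
      -- toks.remove("SUPER"); for extra in ("CTRL","SHIFT"): if extra not in toks: toks.append(extra)
      (["CTRL", "SHIFT"] : List String).foldl
        (fun acc e => if acc.contains e then acc else acc ++ [e])
        ((PySem.List.remove? toks "SUPER").getD toks)
    else toks
  let mac := platform == "mac"
  let canon : List String := ["CTRL", "SHIFT", "ALT", "SUPER"]
  -- out = [_mod_name(m, mac) for m in canon for t in toks if t == m]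
  let out := canon.flatMap (fun m => (toks.filter (fun t => t == m)).map (fun _ => pvModName m mac))
  -- out += [t for t in toks if t not in canon]
  let out := out ++ toks.filter (fun t => !canon.contains t)
  -- return "+".join(out + [key])
  PySem.Str.join "+" (out ++ [key])

-- ===== PRECONDITION & SPEC =====
def Spec_format_key (mods_raw : String) (key : String) (platform : String) (out : String) : Prop := out = format_key_alt mods_raw key platform
instance (mods_raw : String) (key : String) (platform : String) (out : String) : Decidable (Spec_format_key mods_raw key platform out) := by unfold Spec_format_key; infer_instance

-- ===== CLAIM (what is proved, stated in full; the proofs are below) =====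
def Claim_equal_format_key : Prop := ∀ (mods_raw : String) (key : String) (platform : String), Dom_format_key mods_raw key platform → Spec_format_key mods_raw key platform (format_key mods_raw key platform)

-- ===== LEMMAS AND PROOFS =====

-- the sort key of A: order.get(x, 9)
def pvOkey (x : String) : Int :=
  PySem.Dict.getD ⟨[("CTRL", 0), ("SHIFT", 1), ("ALT", 2), ("SUPER", 3)]⟩ x 9

-- A's stable sort groups the tokens in canonical order, unknown tokens last in original order
def pvGrp (ts : List String) : List String :=
  ts.filter (fun t => t == "CTRL") ++ ts.filter (fun t => t == "SHIFT") ++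
  ts.filter (fun t => t == "ALT") ++ ts.filter (fun t => t == "SUPER") ++
  ts.filter (fun t => !(["CTRL", "SHIFT", "ALT", "SUPER"] : List String).contains t)

lemma pvOkey_other (x : String) (h : (["CTRL", "SHIFT", "ALT", "SUPER"] : List String).contains x = false) :
    pvOkey x = 9 := by
  simp only [List.contains_eq_mem, List.mem_cons, decide_eq_false_iff_not, not_or] at h
  obtain ⟨h1, h2, h3, h4, -⟩ := h
  have c1 : ("CTRL" == x) = false := by simp [Ne.symm h1]
  have c2 : ("SHIFT" == x) = false := by simp [Ne.symm h2]
  have c3 : ("ALT" == x) = false := by simp [Ne.symm h3]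
  have c4 : ("SUPER" == x) = false := by simp [Ne.symm h4]
  simp [pvOkey, PySem.Dict.getD, PySem.Dict.get?, List.find?, c1, c2, c3, c4]

lemma pvOkey_le (x : String) : pvOkey x ≤ 9 := by
  by_cases h1 : x = "CTRL"; · subst h1; decide
  by_cases h2 : x = "SHIFT"; · subst h2; decide
  by_cases h3 : x = "ALT"; · subst h3; decide
  by_cases h4 : x = "SUPER"; · subst h4; decide
  rw [pvOkey_other x (by simp [h1, h2, h3, h4])]

lemma pvInsertBy_all_before {α : Type} (b : α → α → Bool) (x : α) (ys : List α)
    (h : ∀ y ∈ ys, b x y = true) : PySem.List.insertBy b x ys = x :: ys := by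
  cases ys with
  | nil => rfl
  | cons a t => simp [PySem.List.insertBy, h a (by simp)]

lemma pvInsertBy_append_none {α : Type} (b : α → α → Bool) (x : α) (ys zs : List α)
    (h : ∀ y ∈ ys, b x y = false) : PySem.List.insertBy b x (ys ++ zs) = ys ++ PySem.List.insertBy b x zs := by
  induction ys with
  | nil => simp
  | cons a t ih =>
    simp [PySem.List.insertBy, h a (by simp), ih (fun y hy => h y (by simp [hy]))]

lemma pvInsertBy_mid (x : String) (A B : List String)
    (hA : ∀ y ∈ A, ¬ pvOkey x < pvOkey y) (hB : ∀ y ∈ B, pvOkey x < pvOkey y) :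
    PySem.List.insertBy (fun a b => decide (pvOkey a < pvOkey b)) x (A ++ B) = A ++ x :: B := by
  rw [pvInsertBy_append_none _ _ _ _ (fun y hy => by simp [hA y hy]),
      pvInsertBy_all_before _ _ _ (fun y hy => by simp [hB y hy])]

lemma pvEq_of_mem_filter {y c : String} {ts : List String}
    (h : y ∈ ts.filter (fun t => t == c)) : y = c := by
  simp only [List.mem_filter, beq_iff_eq] at h
  exact h.2

lemma pvUnknown_of_mem_filter {y : String} {ts : List String}
    (h : y ∈ ts.filter (fun t => !(["CTRL", "SHIFT", "ALT", "SUPER"] : List String).contains t)) :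
    (["CTRL", "SHIFT", "ALT", "SUPER"] : List String).contains y = false := by
  simp only [List.mem_filter, Bool.not_eq_eq_eq_not, Bool.not_true] at h
  exact h.2

lemma pvSorted_grp (ts : List String) :
    PySem.List.sorted ts (fun x => pvOkey x) = pvGrp ts := by
  rw [PySem.List.sorted_eq_foldl_insertBy]
  induction ts using List.reverseRecOn with
  | nil => rfl
  | append_singleton ts x ih =>
    rw [List.foldl_append, List.foldl_cons, List.foldl_nil, ih]
    by_cases h1 : x = "CTRL"
    · subst h1
      simp only [pvGrp, List.filter_append, List.append_assoc]
      rw [pvInsertBy_mid _ _ _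
        (fun y hy => by rw [pvEq_of_mem_filter hy]; decide)
        (fun y hy => by
          rcases List.mem_append.1 hy with hy | hy
          · rw [pvEq_of_mem_filter hy]; decide
          rcases List.mem_append.1 hy with hy | hy
          · rw [pvEq_of_mem_filter hy]; decide
          rcases List.mem_append.1 hy with hy | hy
          · rw [pvEq_of_mem_filter hy]; decide
          · rw [pvOkey_other y (pvUnknown_of_mem_filter hy)]; decide)]
      simp
    by_cases h2 : x = "SHIFT"
    · subst h2
      simp only [pvGrp, List.filter_append, List.append_assoc]
      rw [show ts.filter (fun t => t == "CTRL") ++ (ts.filter (fun t => t == "SHIFT") ++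
            (ts.filter (fun t => t == "ALT") ++ (ts.filter (fun t => t == "SUPER") ++
              ts.filter (fun t => !(["CTRL", "SHIFT", "ALT", "SUPER"] : List String).contains t)))) =
          (ts.filter (fun t => t == "CTRL") ++ ts.filter (fun t => t == "SHIFT")) ++
            (ts.filter (fun t => t == "ALT") ++ (ts.filter (fun t => t == "SUPER") ++
              ts.filter (fun t => !(["CTRL", "SHIFT", "ALT", "SUPER"] : List String).contains t)))
        by simp]
      rw [pvInsertBy_mid _ _ _
        (fun y hy => by
          rcases List.mem_append.1 hy with hy | hy
          · rw [pvEq_of_mem_filter hy]; decide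
          · rw [pvEq_of_mem_filter hy]; decide)
        (fun y hy => by
          rcases List.mem_append.1 hy with hy | hy
          · rw [pvEq_of_mem_filter hy]; decide
          rcases List.mem_append.1 hy with hy | hy
          · rw [pvEq_of_mem_filter hy]; decide
          · rw [pvOkey_other y (pvUnknown_of_mem_filter hy)]; decide)]
      simp
    by_cases h3 : x = "ALT"
    · subst h3
      simp only [pvGrp, List.filter_append, List.append_assoc]
      rw [show ts.filter (fun t => t == "CTRL") ++ (ts.filter (fun t => t == "SHIFT") ++
            (ts.filter (fun t => t == "ALT") ++ (ts.filter (fun t => t == "SUPER") ++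
              ts.filter (fun t => !(["CTRL", "SHIFT", "ALT", "SUPER"] : List String).contains t)))) =
          (ts.filter (fun t => t == "CTRL") ++ (ts.filter (fun t => t == "SHIFT") ++
            ts.filter (fun t => t == "ALT"))) ++
            (ts.filter (fun t => t == "SUPER") ++
              ts.filter (fun t => !(["CTRL", "SHIFT", "ALT", "SUPER"] : List String).contains t))
        by simp]
      rw [pvInsertBy_mid _ _ _
        (fun y hy => by
          rcases List.mem_append.1 hy with hy | hy
          · rw [pvEq_of_mem_filter hy]; decide
          rcases List.mem_append.1 hy with hy | hy
          · rw [pvEq_of_mem_filter hy]; decide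
          · rw [pvEq_of_mem_filter hy]; decide)
        (fun y hy => by
          rcases List.mem_append.1 hy with hy | hy
          · rw [pvEq_of_mem_filter hy]; decide
          · rw [pvOkey_other y (pvUnknown_of_mem_filter hy)]; decide)]
      simp
    by_cases h4 : x = "SUPER"
    · subst h4
      simp only [pvGrp, List.filter_append, List.append_assoc]
      rw [show ts.filter (fun t => t == "CTRL") ++ (ts.filter (fun t => t == "SHIFT") ++
            (ts.filter (fun t => t == "ALT") ++ (ts.filter (fun t => t == "SUPER") ++
              ts.filter (fun t => !(["CTRL", "SHIFT", "ALT", "SUPER"] : List String).contains t)))) =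
          (ts.filter (fun t => t == "CTRL") ++ (ts.filter (fun t => t == "SHIFT") ++
            (ts.filter (fun t => t == "ALT") ++ ts.filter (fun t => t == "SUPER")))) ++
            ts.filter (fun t => !(["CTRL", "SHIFT", "ALT", "SUPER"] : List String).contains t)
        by simp]
      rw [pvInsertBy_mid _ _ _
        (fun y hy => by
          rcases List.mem_append.1 hy with hy | hy
          · rw [pvEq_of_mem_filter hy]; decide
          rcases List.mem_append.1 hy with hy | hy
          · rw [pvEq_of_mem_filter hy]; decide
          rcases List.mem_append.1 hy with hy | hy
          · rw [pvEq_of_mem_filter hy]; decide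
          · rw [pvEq_of_mem_filter hy]; decide)
        (fun y hy => by
          rw [pvOkey_other y (pvUnknown_of_mem_filter hy)]; decide)]
      simp
    · have hx : (["CTRL", "SHIFT", "ALT", "SUPER"] : List String).contains x = false := by
        simp [h1, h2, h3, h4]
      rw [PySem.List.insertBy_of_forall_not_before _ _ _
        (fun y hy => by
          simp only [decide_eq_false_iff_not, not_lt, pvOkey_other x hx]
          exact pvOkey_le y)]
      simp [pvGrp, List.filter_append, h1, h2, h3, h4]

lemma pvMap_filter_const {ts : List String} (c : String) (f : String → String) :
    (ts.filter (fun t => t == c)).map f = (ts.filter (fun t => t == c)).map (fun _ => f c) :=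
  List.map_congr_left (fun y hy => by rw [pvEq_of_mem_filter hy])

lemma pvGetD_self_mac (t : String)
    (h : (["CTRL", "SHIFT", "ALT", "SUPER"] : List String).contains t = false) :
    PySem.Dict.getD (⟨[("CTRL", "Ctrl"), ("SHIFT", "Shift"), ("ALT", "Opt"), ("SUPER", "Cmd")]⟩ :
      PySem.Dict String String) t t = t := by
  simp only [List.contains_eq_mem, List.mem_cons, decide_eq_false_iff_not, not_or] at h
  obtain ⟨h1, h2, h3, h4, -⟩ := h
  have c1 : ("CTRL" == t) = false := by simp [Ne.symm h1]
  have c2 : ("SHIFT" == t) = false := by simp [Ne.symm h2]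
  have c3 : ("ALT" == t) = false := by simp [Ne.symm h3]
  have c4 : ("SUPER" == t) = false := by simp [Ne.symm h4]
  simp [PySem.Dict.getD, PySem.Dict.get?, List.find?, c1, c2, c3, c4]

lemma pvGetD_self_nonmac (t : String)
    (h : (["CTRL", "SHIFT", "ALT", "SUPER"] : List String).contains t = false) :
    PySem.Dict.getD (⟨[("CTRL", "Ctrl"), ("SHIFT", "Shift"), ("ALT", "Alt")]⟩ :
      PySem.Dict String String) t t = t := by
  simp only [List.contains_eq_mem, List.mem_cons, decide_eq_false_iff_not, not_or] at h
  obtain ⟨h1, h2, h3, -⟩ := h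
  have c1 : ("CTRL" == t) = false := by simp [Ne.symm h1]
  have c2 : ("SHIFT" == t) = false := by simp [Ne.symm h2]
  have c3 : ("ALT" == t) = false := by simp [Ne.symm h3]
  simp [PySem.Dict.getD, PySem.Dict.get?, List.find?, c1, c2, c3]

lemma pvChars_join_snoc (sep : List Char) (ls : List (List Char)) (c : List Char) (h : ls ≠ []) :
    PySem.Chars.join sep (ls ++ [c]) = PySem.Chars.join sep ls ++ sep ++ c := by
  induction ls with
  | nil => exact absurd rfl h
  | cons a t ih =>
    cases t with
    | nil => simp [PySem.Chars.join_cons_cons, PySem.Chars.join_singleton]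
    | cons b t2 =>
      rw [show a :: b :: t2 ++ [c] = a :: b :: (t2 ++ [c]) from rfl,
        PySem.Chars.join_cons_cons,
        show b :: (t2 ++ [c]) = (b :: t2) ++ [c] from rfl, ih (by simp),
        PySem.Chars.join_cons_cons]
      simp [List.append_assoc]

lemma pvJoin_snoc (l : List String) (k : String) :
    PySem.Str.join "+" (l ++ [k]) =
      if l = [] then k else PySem.Str.join "+" l ++ "+" ++ k := by
  rw [← String.toList_inj]
  cases l with
  | nil => simp [PySem.Str.toList_join, PySem.Chars.join_singleton]
  | cons a t =>
    rw [if_neg (by simp : ¬ (a :: t = []))]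
    rw [PySem.Str.toList_join, List.map_append]
    simp only [List.map_cons, List.map_nil]
    rw [pvChars_join_snoc _ _ _ (by simp)]
    simp [PySem.Str.toList_join]

lemma pvIf_bne (L : List String) (k j : String) :
    (if L != [] then j else k) = if L = [] then k else j := by
  cases L <;> simp

lemma pvTail_eq (ts : List String) (k p : String) :
    (if (PySem.List.sorted ts (fun x =>
          PySem.Dict.getD (⟨[("CTRL", 0), ("SHIFT", 1), ("ALT", 2), ("SUPER", 3)]⟩ : PySem.Dict String Int) x 9)).map
        (fun m => PySem.Dict.getD
          ((if p == "mac" then ⟨[("CTRL", "Ctrl"), ("SHIFT", "Shift"), ("ALT", "Opt"), ("SUPER", "Cmd")]⟩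
           else ⟨[("CTRL", "Ctrl"), ("SHIFT", "Shift"), ("ALT", "Alt")]⟩) : PySem.Dict String String) m m) != [] then
      PySem.Str.join "+" ((PySem.List.sorted ts (fun x =>
          PySem.Dict.getD (⟨[("CTRL", 0), ("SHIFT", 1), ("ALT", 2), ("SUPER", 3)]⟩ : PySem.Dict String Int) x 9)).map
        (fun m => PySem.Dict.getD
          ((if p == "mac" then ⟨[("CTRL", "Ctrl"), ("SHIFT", "Shift"), ("ALT", "Opt"), ("SUPER", "Cmd")]⟩
           else ⟨[("CTRL", "Ctrl"), ("SHIFT", "Shift"), ("ALT", "Alt")]⟩) : PySem.Dict String String) m m)) ++ "+" ++ k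
    else k) =
    PySem.Str.join "+"
      (((["CTRL", "SHIFT", "ALT", "SUPER"] : List String).flatMap
          (fun m => (ts.filter (fun t => t == m)).map (fun _ => pvModName m (p == "mac"))) ++
        ts.filter (fun t => !(["CTRL", "SHIFT", "ALT", "SUPER"] : List String).contains t)) ++ [k]) := by
  rw [show (fun x => PySem.Dict.getD
        (⟨[("CTRL", 0), ("SHIFT", 1), ("ALT", 2), ("SUPER", 3)]⟩ : PySem.Dict String Int) x 9) =
      (fun x : String => pvOkey x) from rfl, pvSorted_grp, pvJoin_snoc]
  have hmap : (pvGrp ts).map (fun m => PySem.Dict.getD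
      (if p == "mac" then ⟨[("CTRL", "Ctrl"), ("SHIFT", "Shift"), ("ALT", "Opt"), ("SUPER", "Cmd")]⟩
       else ⟨[("CTRL", "Ctrl"), ("SHIFT", "Shift"), ("ALT", "Alt")]⟩) m m) =
      (["CTRL", "SHIFT", "ALT", "SUPER"] : List String).flatMap
          (fun m => (ts.filter (fun t => t == m)).map (fun _ => pvModName m (p == "mac"))) ++
        ts.filter (fun t => !(["CTRL", "SHIFT", "ALT", "SUPER"] : List String).contains t) := by
    by_cases hp : p = "mac"
    · subst hp
      simp only [pvGrp, List.flatMap_cons, List.flatMap_nil, List.map_append, List.append_nil,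
        beq_self_eq_true, if_true, List.append_assoc]
      rw [pvMap_filter_const "CTRL", pvMap_filter_const "SHIFT", pvMap_filter_const "ALT",
        pvMap_filter_const "SUPER",
        List.map_congr_left (fun y hy => pvGetD_self_mac y (pvUnknown_of_mem_filter hy)),
        List.map_id']
      rfl
    · have hb : (p == "mac") = false := by simp [hp]
      simp only [hb, Bool.false_eq_true, if_false, pvGrp, List.flatMap_cons, List.flatMap_nil,
        List.map_append, List.append_nil, List.append_assoc]
      rw [pvMap_filter_const "CTRL", pvMap_filter_const "SHIFT", pvMap_filter_const "ALT",
        pvMap_filter_const "SUPER",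
        List.map_congr_left (fun y hy => pvGetD_self_nonmac y (pvUnknown_of_mem_filter hy)),
        List.map_id']
      rfl
  rw [hmap, pvIf_bne]

-- ===== VERDICT (by name: the statement is the Claim_ definition above) =====
theorem format_key_spec : Claim_equal_format_key := by
  intro mods_raw key platform _
  unfold Spec_format_key format_key format_key_alt
  dsimp only
  rw [PySem.List.foldl_append_if (fun t => PySem.Str.replace t "Modifiers::" "" != "NONE")
    (fun t => PySem.Str.replace t "Modifiers::" ""), List.nil_append, List.filter_map]
  dsimp only [Function.comp, List.foldl_cons, List.foldl_nil]
  exact pvTail_eq _ key platform
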